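-- pv_equiv track=rewrite | github.com/SDGLBL/SmartHelmetSystem | utils/queryFile.py | queryAllTimeAccordingList
-- ===== SOURCE A (Python) =====
-- def queryAllTimeAccordingList(datas):
--     dataBaseTime = set()
--     for data in datas:
--         yearMonthDay=data['time'].split(' ')[0]
--         HourMinuteSecond = data['time'].split(' ')[1]
--         hour = HourMinuteSecond.split(':')[0]
--         dataBaseTime.add(yearMonthDay+"-"+hour)
--
--     dataBaseTime = list(dataBaseTime)
--     dataBaseTime.sort()
--     return dataBaseTime
-- ===== SOURCE B (Python) =====
-- def queryAllTimeAccordingList(datas):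
--     keys = []
--     for data in datas:
--         t = data['time']
--         yearMonthDay = t.split(' ')[0]
--         HourMinuteSecond = t.split(' ')[1]
--         keys.append(yearMonthDay + "-" + HourMinuteSecond.split(':')[0])
--     keys.sort()
--     out = []
--     prev = None
--     for k in keys:
--         if k != prev:
--             out.append(k)
--             prev = k
--     return out
-- ===== Notes on version B (the rewrite author's own statement) =====
-- stated objective: alternative
-- what changed: Replaces A's hash-set accumulation followed by sorting with a plain list of keys that is sorted once and then deduplicated in a single adjacent-compare pass (prev pointer), removing the set data structure entirely.
import Mathlib
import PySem

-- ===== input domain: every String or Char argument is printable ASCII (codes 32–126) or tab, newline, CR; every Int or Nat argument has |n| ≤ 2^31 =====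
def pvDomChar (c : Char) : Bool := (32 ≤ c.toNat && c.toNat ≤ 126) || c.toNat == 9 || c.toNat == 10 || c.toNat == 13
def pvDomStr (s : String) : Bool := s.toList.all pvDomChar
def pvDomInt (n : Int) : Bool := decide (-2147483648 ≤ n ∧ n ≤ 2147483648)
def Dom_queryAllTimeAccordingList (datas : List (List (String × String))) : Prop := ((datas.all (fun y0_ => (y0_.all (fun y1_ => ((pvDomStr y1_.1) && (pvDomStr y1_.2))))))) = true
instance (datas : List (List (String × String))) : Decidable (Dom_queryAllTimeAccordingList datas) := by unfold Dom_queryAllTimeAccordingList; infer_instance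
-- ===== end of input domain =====

-- B replaces A's hash set + sort by a plain key list sorted once then deduplicated in one
-- adjacent-compare pass; return values are proved equal wherever the Python A returns.

-- ===== PORT A =====
-- per-record key: data['time'].split(' ')[0] + "-" + data['time'].split(' ')[1].split(':')[0];
-- none exactly where Python raises (missing 'time' key, or no space in the value)
def pvExtractKey (data : List (String × String)) : Option String :=
  match (data.find? (fun p => p.1 == "time")).map (·.2) with
  | none => none
  | some t =>
    match PySem.Str.split? t " " with
    | none => none
    | some parts =>
      match PySem.List.pyGet? parts 0, PySem.List.pyGet? parts 1 with
      | some yearMonthDay, some hourMinuteSecond =>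
        match PySem.Str.split? hourMinuteSecond ":" with
        | none => none
        | some hparts =>
          match PySem.List.pyGet? hparts 0 with
          | some hour => some (PySem.Str.join "" [yearMonthDay, "-", hour])
          | none => none
      | _, _ => none

def queryAllTimeAccordingList (datas : List (List (String × String))) : List String :=
  let dataBaseTime : PySem.Set String :=
    datas.foldl (fun acc data =>
      match pvExtractKey data with
      | some k => PySem.Set.add acc k
      | none => acc) PySem.Set.empty
  PySem.List.sorted dataBaseTime (fun x => x) false

-- ===== PORT B =====
def queryAllTimeAccordingList_alt (datas : List (List (String × String))) : List String :=
  let keys : List String :=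
    datas.foldl (fun acc data =>
      match pvExtractKey data with
      | some k => acc ++ [k]
      | none => acc) []
  let skeys := PySem.List.sorted keys (fun x => x) false
  (skeys.foldl (fun (st : List String × Option String) k =>
      if some k ≠ st.2 then (st.1 ++ [k], some k) else st) ([], none)).1

-- ===== PRECONDITION & SPEC =====
-- Pre_ excludes exactly the inputs where Python A raises: a record without a 'time' key
-- (KeyError) or whose 'time' value contains no space (IndexError on split(' ')[1]).
def Pre_queryAllTimeAccordingList (datas : List (List (String × String))) : Prop :=
  (datas.all (fun data =>
    match data.find? (fun p => p.1 == "time") with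
    | some p => PySem.Str.isIn " " p.2
    | none => false)) = true
instance (datas : List (List (String × String))) : Decidable (Pre_queryAllTimeAccordingList datas) := by unfold Pre_queryAllTimeAccordingList; infer_instance

def pvWitness_queryAllTimeAccordingList : (List (List (String × String))) :=
  [[("time", "time time")]]

def Spec_queryAllTimeAccordingList (datas : List (List (String × String))) (out : List String) : Prop := out = queryAllTimeAccordingList_alt datas
instance (datas : List (List (String × String))) (out : List String) : Decidable (Spec_queryAllTimeAccordingList datas out) := by unfold Spec_queryAllTimeAccordingList; infer_instance

-- ===== CLAIM (what is proved, stated in full; the proofs are below) =====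
def Claim_equal_queryAllTimeAccordingList : Prop := ∀ (datas : List (List (String × String))), Dom_queryAllTimeAccordingList datas → Pre_queryAllTimeAccordingList datas → Spec_queryAllTimeAccordingList datas (queryAllTimeAccordingList datas)

-- ===== LEMMAS AND PROOFS =====

-- A's set-building loop is set(filterMap key)
theorem foldl_setadd_eq (datas : List (List (String × String))) (s : PySem.Set String) :
    datas.foldl (fun acc data =>
      match pvExtractKey data with
      | some k => PySem.Set.add acc k
      | none => acc) s
    = (datas.filterMap pvExtractKey).foldl PySem.Set.add s := by
  induction datas generalizing s with
  | nil => rfl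
  | cons d t ih =>
    cases h : pvExtractKey d <;> simp [h, ih]

-- B's key-collecting loop is filterMap
theorem foldl_append_eq (datas : List (List (String × String))) (acc : List String) :
    datas.foldl (fun acc data =>
      match pvExtractKey data with
      | some k => acc ++ [k]
      | none => acc) acc
    = acc ++ datas.filterMap pvExtractKey := by
  induction datas generalizing acc with
  | nil => simp
  | cons d t ih =>
    cases h : pvExtractKey d <;> simp [h, ih]

-- the adjacent-dedup loop, as a recursion
def dedupFrom (prev : Option String) : List String → List String
  | [] => []
  | k :: ks => if some k ≠ prev then k :: dedupFrom (some k) ks else dedupFrom prev ks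

theorem foldl_dedup_fst (ys : List String) (out : List String) (prev : Option String) :
    (ys.foldl (fun (st : List String × Option String) k =>
      if some k ≠ st.2 then (st.1 ++ [k], some k) else st) (out, prev)).1
    = out ++ dedupFrom prev ys := by
  induction ys generalizing out prev with
  | nil => simp [dedupFrom]
  | cons k ks ih =>
    rw [List.foldl_cons]
    by_cases h : some k = prev
    · have hstep : (if some k ≠ (out, prev).2 then ((out, prev).1 ++ [k], some k) else (out, prev)) = (out, prev) := by
        simp [h]
      rw [hstep, ih, dedupFrom, if_neg (by simp [h])]
    · have hstep : (if some k ≠ (out, prev).2 then ((out, prev).1 ++ [k], some k) else (out, prev)) = (out ++ [k], some k) := by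
        simp [h]
      rw [hstep, ih, dedupFrom, if_pos (by simp [h])]
      simp

theorem dedupFrom_some (ys : List String) (h : ys.Pairwise (· ≤ ·)) (p : String)
    (hp : ∀ x ∈ ys, p ≤ x) :
    (dedupFrom (some p) ys).Pairwise (· < ·) ∧
    (∀ a, a ∈ dedupFrom (some p) ys ↔ a ∈ ys ∧ a ≠ p) ∧
    (∀ a ∈ dedupFrom (some p) ys, p < a) := by
  induction ys generalizing p with
  | nil => simp [dedupFrom]
  | cons x t ih =>
    rcases List.pairwise_cons.mp h with ⟨hx, ht⟩
    by_cases hxp : x = p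
    · subst hxp
      obtain ⟨h1, h2, h3⟩ := ih ht x hx
      have hd : dedupFrom (some x) (x :: t) = dedupFrom (some x) t := by
        rw [dedupFrom, if_neg (by simp)]
      refine ⟨hd ▸ h1, ?_, hd ▸ h3⟩
      intro a
      rw [hd, h2 a, List.mem_cons]
      constructor
      · rintro ⟨ha, hne⟩; exact ⟨Or.inr ha, hne⟩
      · rintro ⟨(rfl | ha), hne⟩
        · exact absurd rfl hne
        · exact ⟨ha, hne⟩
    · have hpx : p < x := lt_of_le_of_ne (hp x (by simp)) (fun e => hxp e.symm)
      obtain ⟨h1, h2, h3⟩ := ih ht x hx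
      have hd : dedupFrom (some p) (x :: t) = x :: dedupFrom (some x) t := by
        rw [dedupFrom, if_pos (by simp [hxp])]
      refine ⟨?_, ?_, ?_⟩
      · rw [hd]
        refine List.pairwise_cons.mpr ⟨?_, h1⟩
        intro a ha
        obtain ⟨hat, hax⟩ := (h2 a).mp ha
        exact lt_of_le_of_ne (hx a hat) (Ne.symm hax)
      · intro a
        rw [hd, List.mem_cons, List.mem_cons]
        constructor
        · rintro (rfl | ha)
          · exact ⟨Or.inl rfl, ne_of_gt hpx⟩
          · obtain ⟨hat, hax⟩ := (h2 a).mp ha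
            exact ⟨Or.inr hat, ne_of_gt (lt_of_lt_of_le hpx (hx a hat))⟩
        · rintro ⟨(rfl | hat), hap⟩
          · exact Or.inl rfl
          · by_cases hax : a = x
            · exact Or.inl hax
            · exact Or.inr ((h2 a).mpr ⟨hat, hax⟩)
      · intro a ha
        rw [hd] at ha
        rcases List.mem_cons.mp ha with rfl | ha
        · exact hpx
        · exact lt_trans hpx (h3 a ha)

theorem dedupFrom_none (ys : List String) (h : ys.Pairwise (· ≤ ·)) :
    (dedupFrom none ys).Pairwise (· < ·) ∧ (∀ a, a ∈ dedupFrom none ys ↔ a ∈ ys) := by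
  cases ys with
  | nil => simp [dedupFrom]
  | cons x t =>
    rcases List.pairwise_cons.mp h with ⟨hx, ht⟩
    obtain ⟨h1, h2, h3⟩ := dedupFrom_some t ht x hx
    have hd : dedupFrom none (x :: t) = x :: dedupFrom (some x) t := by
      rw [dedupFrom, if_pos (by simp)]
    refine ⟨?_, ?_⟩
    · rw [hd]; exact List.pairwise_cons.mpr ⟨h3, h1⟩
    · intro a
      rw [hd, List.mem_cons, List.mem_cons]
      constructor
      · rintro (rfl | ha)
        · exact Or.inl rfl
        · exact Or.inr ((h2 a).mp ha).1
      · rintro (rfl | ha)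
        · exact Or.inl rfl
        · by_cases hax : a = x
          · exact Or.inl hax
          · exact Or.inr ((h2 a).mpr ⟨ha, hax⟩)

-- the heart: sorted(set(keys)) = adjacent-dedup of sorted(keys)
theorem sorted_set_eq_dedup_sorted (keys : List String) :
    PySem.List.sorted (PySem.Set.ofList keys) (fun x => x) false
    = dedupFrom none (PySem.List.sorted keys (fun x => x) false) := by
  have hs : (PySem.List.sorted keys (fun x => x) false).Pairwise (· ≤ ·) := by
    simpa using PySem.List.sorted_pairwise keys (fun x => x)
  obtain ⟨h1, h2⟩ := dedupFrom_none _ hs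
  apply PySem.List.sorted_eq_of_perm_of_pairwise_lt
  · rw [List.perm_ext_iff_of_nodup (h1.imp ne_of_lt) (PySem.Set.nodup_ofList keys)]
    intro a
    rw [h2 a, PySem.List.mem_sorted, PySem.Set.mem_ofList]
  · simpa using h1

-- ===== VERDICT (by name: the statement is the Claim_ definition above) =====
theorem queryAllTimeAccordingList_spec : Claim_equal_queryAllTimeAccordingList := by
  intro datas _ _
  unfold Spec_queryAllTimeAccordingList queryAllTimeAccordingList queryAllTimeAccordingList_alt
  simp only [foldl_setadd_eq, foldl_append_eq, List.nil_append, foldl_dedup_fst]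
  have hofl : List.foldl PySem.Set.add PySem.Set.empty (datas.filterMap pvExtractKey)
      = PySem.Set.ofList (datas.filterMap pvExtractKey) :=
    (PySem.Set.ofList_eq_foldl _).symm
  rw [hofl, sorted_set_eq_dedup_sorted]
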